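-- pv_equiv track=rewrite | github.com/VVKot/coding-competitions | pramp/diff_between_two_strings.py | diff_strings_rec
-- ===== SOURCE A (Python) =====
-- def diff_strings_rec(source, target, dp={}):
--     dp_key = (source, target)
--     if dp_key in dp:
--         return dp[dp_key]
--     if not source and not target:
--         result = []
--         dp[dp_key] = (0, result)
--         return dp[dp_key]
--     if not source:
--         result = ["+" + ch for ch in target]
--         dp[dp_key] = (len(target), result)
--         return dp[dp_key]
--     if not target:
--         result = ["-" + ch for ch in source]
--         dp[dp_key] = (len(source), result)
--         return dp[dp_key]
--     if source[0] == target[0]: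
--         result = [source[0]]
--         num_edits, edits = diff_strings_rec(source[1:], target[1:], dp)
--         result.extend(edits)
--         dp[dp_key] = (num_edits, result)
--         return dp[dp_key]
--     else:
--         num_edits_del, edits_del = diff_strings_rec(source[1:], target, dp)
--         num_edits_ins, edits_ins = diff_strings_rec(source, target[1:], dp)
--         if num_edits_ins < num_edits_del:
--             result = ["+" + target[0]]
--             result.extend(edits_ins)
--             dp[dp_key] = (num_edits_ins + 1, result)
--             return dp[dp_key]
--         else:
--             result = ["-" + source[0]]
--             result.extend(edits_del)
--             dp[dp_key] = (num_edits_del + 1, result)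
--             return dp[dp_key]
-- ===== SOURCE B (Python) =====
-- # Bottom-up DP over index suffixes: build rows of (cost, edit script) cells
-- # from the empty-source row upward; no recursion, no memo dict needed (dp kept
-- # only for call-compatibility and ignored).
-- def diff_strings_rec(source, target, dp={}):
--     s, t = list(source), list(target)
--     m, n = len(s), len(t)
--     # row for source suffix "" : cell j covers target[j:]
--     row = [(0, [])]
--     for j in range(n - 1, -1, -1):
--         cost, script = row[0]
--         row = [(cost + 1, ["+" + t[j]] + script)] + row
--     for i in range(m - 1, -1, -1):
--         new = [(m - i, ["-" + c for c in s[i:]])]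
--         for j in range(n - 1, -1, -1):
--             if s[i] == t[j]:
--                 c, e = row[j + 1]
--                 cell = (c, [s[i]] + e)
--             else:
--                 cd, ed = row[j]
--                 ci, ei = new[0]
--                 if ci < cd:
--                     cell = (ci + 1, ["+" + t[j]] + ei)
--                 else:
--                     cell = (cd + 1, ["-" + s[i]] + ed)
--             new = [cell] + new
--         row = new
--     return row[0]
-- ===== Notes on version B (the rewrite author's own statement) =====
-- stated objective: alternative
-- what changed: Top-down recursion with a memo dict keyed by string slices is replaceded by an iterative bottom-up DP that builds rows of (cost, script) cells over index suffixes, with no recursion and no slice-keyed cache.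
import Mathlib
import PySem

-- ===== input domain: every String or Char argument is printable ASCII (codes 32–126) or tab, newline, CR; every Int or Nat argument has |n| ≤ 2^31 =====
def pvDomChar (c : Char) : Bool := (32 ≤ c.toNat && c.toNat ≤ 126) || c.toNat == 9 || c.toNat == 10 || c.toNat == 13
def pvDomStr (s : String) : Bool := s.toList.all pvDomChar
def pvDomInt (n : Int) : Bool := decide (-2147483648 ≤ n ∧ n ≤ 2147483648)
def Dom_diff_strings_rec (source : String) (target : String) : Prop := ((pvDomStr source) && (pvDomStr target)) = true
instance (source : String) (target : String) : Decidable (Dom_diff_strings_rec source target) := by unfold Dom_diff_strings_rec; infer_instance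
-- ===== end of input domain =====

-- ===== PORT A =====
-- A's dp={} default argument is a pure memo cache (values per key are determined by the
-- recursion itself), so the port is the plain recursion; same branches, same tie-break.
def goA : List Char → List Char → Int × List String
  | [], [] => (0, [])
  | [], t => ((t.length : Int), t.map (fun ch => String.ofList ['+', ch]))
  | s, [] => ((s.length : Int), s.map (fun ch => String.ofList ['-', ch]))
  | sc :: s', tc :: t' =>
    if sc = tc then
      let r := goA s' t'
      (r.1, String.ofList [sc] :: r.2)
    else
      let rd := goA s' (tc :: t')
      let ri := goA (sc :: s') t'
      if ri.1 < rd.1 then (ri.1 + 1, String.ofList ['+', tc] :: ri.2)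
      else (rd.1 + 1, String.ofList ['-', sc] :: rd.2)
termination_by s t => s.length + t.length

def diff_strings_rec (source : String) (target : String) : Int × List String :=
  goA source.toList target.toList

-- ===== PORT B =====
-- B: iterative bottom-up DP; a row is the list of (cost, script) cells for the
-- target suffixes, built right-to-left; rows built from the empty-source row up.

-- the row for the empty source: cell j = (len t[j:], all-insert script)
def baseRow : List Char → List (Int × List String)
  | [] => [(0, [])]
  | tc :: t' =>
    let row := baseRow t'
    let c := row.headD (0, [])
    (c.1 + 1, String.ofList ['+', tc] :: c.2) :: row

-- one row up: given source head sc, the previous row (for the source tail) and the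
-- rightmost cell `last` (all-delete script), build the new row right-to-left
def buildRow (sc : Char) : List Char → List (Int × List String) → (Int × List String) → List (Int × List String)
  | [], _, last => [last]
  | tc :: t', prev, last =>
    let rest := buildRow sc t' prev.tail last
    let pd := prev.headD (0, [])
    let pdiag := prev.tail.headD (0, [])
    let newNext := rest.headD (0, [])
    let cell :=
      if sc = tc then (pdiag.1, String.ofList [sc] :: pdiag.2)
      else if newNext.1 < pd.1 then (newNext.1 + 1, String.ofList ['+', tc] :: newNext.2)
      else (pd.1 + 1, String.ofList ['-', sc] :: pd.2)
    cell :: rest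

def buildTable : List Char → List Char → List (Int × List String)
  | [], t => baseRow t
  | sc :: s', t =>
    let prev := buildTable s' t
    buildRow sc t prev (((s'.length : Int) + 1, String.ofList ['-', sc] :: s'.map (fun ch => String.ofList ['-', ch])))

def diff_strings_rec_alt (source : String) (target : String) : Int × List String :=
  (buildTable source.toList target.toList).headD (0, [])

-- ===== PRECONDITION & SPEC =====
def Spec_diff_strings_rec (source : String) (target : String) (out : Int × List String) : Prop := out = diff_strings_rec_alt source target
instance (source : String) (target : String) (out : Int × List String) : Decidable (Spec_diff_strings_rec source target out) := by unfold Spec_diff_strings_rec; infer_instance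

-- ===== CLAIM (what is proved, stated in full; the proofs are below) =====
def Claim_equal_diff_strings_rec : Prop := ∀ (source : String) (target : String), Dom_diff_strings_rec source target → Spec_diff_strings_rec source target (diff_strings_rec source target)

-- ===== LEMMAS AND PROOFS =====

theorem baseRow_eq (t : List Char) : baseRow t = (List.tails t).map (goA []) := by
  induction t with
  | nil => simp [baseRow, goA]
  | cons tc t' ih =>
    simp only [baseRow, ih, List.tails_cons, List.map_cons]
    cases t' <;> simp [goA]

theorem buildRow_eq (sc : Char) (s' : List Char) (t : List Char) :
    buildRow sc t ((List.tails t).map (goA s'))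
      (((s'.length : Int) + 1, String.ofList ['-', sc] :: s'.map (fun ch => String.ofList ['-', ch])))
      = (List.tails t).map (goA (sc :: s')) := by
  induction t with
  | nil =>
    simp [buildRow, goA]
  | cons tc t' ih =>
    simp only [buildRow, List.tails_cons, List.map_cons, List.tail_cons, ih,
      List.headD_cons]
    congr 1
    cases t' with
    | nil => simp [goA]
    | cons u t'' => simp [goA]

theorem buildTable_eq (s t : List Char) :
    buildTable s t = (List.tails t).map (goA s) := by
  induction s with
  | nil => simpa [buildTable] using baseRow_eq t
  | cons sc s' ih =>
    simp only [buildTable, ih]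
    exact buildRow_eq sc s' t

-- ===== VERDICT (by name: the statement is the Claim_ definition above) =====
theorem diff_strings_rec_spec : Claim_equal_diff_strings_rec := by
  intro source target _
  unfold Spec_diff_strings_rec diff_strings_rec diff_strings_rec_alt
  rw [buildTable_eq]
  cases target.toList <;> simp
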